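-- pv_equiv track=rewrite | github.com/jaytoone/CTX | hf_space/app.py | bfs_expand
-- ===== SOURCE A (Python) =====
-- def bfs_expand(seed_files: list, graph: dict, max_hops: int = 2) -> list:
--     visited = set(seed_files)
--     frontier = list(seed_files)
--     for _ in range(max_hops):
--         next_frontier = []
--         for f in frontier:
--             for dep in graph.get(f, []):
--                 if dep not in visited:
--                     visited.add(dep)
--                     next_frontier.append(dep)
--         frontier = next_frontier
--     return list(visited)
-- ===== SOURCE B (Python) =====
-- def bfs_expand(seed_files: list, graph: dict, max_hops: int = 2) -> list:
--     visited = set(seed_files)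
--     queue = [(f, 0) for f in seed_files]
--     i = 0
--     while i < len(queue):
--         node, depth = queue[i]
--         i += 1
--         if depth < max_hops:
--             for dep in graph.get(node, []):
--                 if dep not in visited:
--                     visited.add(dep)
--                     queue.append((dep, depth + 1))
--     return list(visited)
-- ===== Notes on version B (the rewrite author's own statement) =====
-- stated objective: alternative
-- what changed: Replaces A's per-level frontier/next_frontier swap nested in a range(max_hops) loop by one flat FIFO queue of (node, hop-depth) pairs walked with an index cursor: pop one node, expand it only while its depth < max_hops, enqueue unvisited neighbours at depth+1.
import Mathlib
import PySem

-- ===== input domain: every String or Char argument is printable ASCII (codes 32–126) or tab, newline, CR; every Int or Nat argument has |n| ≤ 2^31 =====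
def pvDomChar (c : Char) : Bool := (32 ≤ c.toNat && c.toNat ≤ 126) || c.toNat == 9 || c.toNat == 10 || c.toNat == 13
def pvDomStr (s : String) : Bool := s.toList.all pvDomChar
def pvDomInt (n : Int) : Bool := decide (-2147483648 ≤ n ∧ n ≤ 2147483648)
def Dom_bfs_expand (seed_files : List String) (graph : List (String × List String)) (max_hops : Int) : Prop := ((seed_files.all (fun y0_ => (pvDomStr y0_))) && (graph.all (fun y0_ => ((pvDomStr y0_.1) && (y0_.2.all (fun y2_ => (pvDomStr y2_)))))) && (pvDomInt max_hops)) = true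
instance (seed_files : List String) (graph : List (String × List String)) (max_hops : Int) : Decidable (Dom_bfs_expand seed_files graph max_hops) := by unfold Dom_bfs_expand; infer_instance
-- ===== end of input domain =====

-- B replaces A's per-level frontier/next_frontier swap by one flat FIFO queue of (node, hop-depth) pairs
-- walked by an index cursor (same visited set, same values in the same discovery order; objective: alternative decomposition).
-- Both return list(visited) (a Python set); outputs are compared as sets, the ports emit insertion order.

-- shared lookup primitive: graph.get(f, []) on the association-list dict (first match, Python dict semantics)
def pvAdj (graph : List (String × List String)) (f : String) : List String :=
  PySem.Dict.getD (PySem.Dict.mk graph) f []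

-- ===== PORT A =====
-- inner two loops of one round: for f in frontier: for dep in graph.get(f, []): …
def pvAStep (graph : List (String × List String)) (st : List String × List String) (f : String) :
    List String × List String :=
  (pvAdj graph f).foldl
    (fun st2 dep =>
      if PySem.Set.contains st2.1 dep then st2
      else (PySem.Set.add st2.1 dep, st2.2 ++ [dep]))
    st

-- one iteration of `for _ in range(max_hops)`: next_frontier = []; …; frontier = next_frontier
def pvARound (graph : List (String × List String)) (st : List String × List String) :
    List String × List String :=
  st.2.foldl (pvAStep graph) (st.1, [])

def bfs_expand (seed_files : List String) (graph : List (String × List String)) (max_hops : Int) : List String :=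
  ((PySem.List.pyRange 0 max_hops 1).foldl (fun st _ => pvARound graph st)
    (PySem.Set.ofList seed_files, seed_files)).1

-- ===== PORT B =====
-- the inner `for dep in graph.get(node, [])` of B: appends (dep, depth+1) to the queue
def pvExpand (v : PySem.Set String) (q : List (String × Int)) (deps : List String) (d1 : Int) :
    PySem.Set String × List (String × Int) :=
  deps.foldl
    (fun st dep =>
      if PySem.Set.contains st.1 dep then st
      else (PySem.Set.add st.1 dep, st.2 ++ [(dep, d1)]))
    (v, q)

-- termination measure apparatus for the while-queue loop (proof-only; the computation is B's code)
def pvW (graph : List (String × List String)) (v : List String) : Nat :=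
  ((graph.flatMap Prod.snd).filter (fun x => !(v.contains x))).length

theorem pvFilter_le {α : Type} (p q : α → Bool) (h : ∀ x, p x = true → q x = true) :
    ∀ L : List α, (L.filter p).length ≤ (L.filter q).length := by
  intro L
  induction L with
  | nil => simp
  | cons a L ih =>
    by_cases hp : p a = true
    · simp [hp, h a hp]; omega
    · simp only [List.filter_cons]
      rw [if_neg (by simp [hp])]
      by_cases hq : q a = true
      · rw [if_pos (by simp [hq])]; simp; omega
      · rw [if_neg (by simp [hq])]; exact ih

theorem pvFilter_lt {α : Type} (p q : α → Bool) (a : α) (h : ∀ x, p x = true → q x = true)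
    (hp : p a = false) (hq : q a = true) :
    ∀ L : List α, a ∈ L → (L.filter p).length < (L.filter q).length := by
  intro L hmem
  induction L with
  | nil => cases hmem
  | cons b L ih =>
    rcases List.mem_cons.mp hmem with hb | hb
    · subst hb
      simp only [List.filter_cons]
      rw [if_neg (by simp [hp]), if_pos (by simp [hq])]
      have := pvFilter_le p q h L
      simp; omega
    · have hlt := ih hb
      simp only [List.filter_cons]
      by_cases hpb : p b = true
      · rw [if_pos (by simp [hpb]), if_pos (by simp [h b hpb])]; simpa using hlt
      · rw [if_neg (by simp [hpb])]
        by_cases hqb : q b = true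
        · rw [if_pos (by simp [hqb])]; simp; omega
        · rw [if_neg (by simp [hqb])]; exact hlt

theorem pvAdj_mem (graph : List (String × List String)) (f x : String)
    (hx : x ∈ pvAdj graph f) : x ∈ graph.flatMap Prod.snd := by
  induction graph with
  | nil =>
    simp [pvAdj, PySem.Dict.getD_eq_get?_getD, PySem.Dict.get?] at hx
  | cons p rest ih =>
    rw [pvAdj, PySem.Dict.getD_eq_get?_getD] at hx
    rw [PySem.Dict.get?_mk_cons] at hx
    by_cases hk : p.1 == f
    · simp [hk] at hx
      rw [List.flatMap_cons]
      exact List.mem_append_left _ hx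
    · rw [if_neg hk] at hx
      have hx' : x ∈ pvAdj rest f := by
        rw [pvAdj, PySem.Dict.getD_eq_get?_getD]; exact hx
      rw [List.flatMap_cons]
      exact List.mem_append_right _ (ih hx')

theorem pvExpand_measure (graph : List (String × List String)) (d1 : Int) :
    ∀ (deps : List String), (∀ x ∈ deps, x ∈ graph.flatMap Prod.snd) →
    ∀ (v : PySem.Set String) (q : List (String × Int)),
      (pvExpand v q deps d1).2.length + 2 * pvW graph (pvExpand v q deps d1).1
        ≤ q.length + 2 * pvW graph v := by
  intro deps
  induction deps with
  | nil => intro _ v q; simp [pvExpand]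
  | cons dep deps ih =>
    intro hsub v q
    have hdep : dep ∈ graph.flatMap Prod.snd := hsub dep (by simp)
    have hrest : ∀ x ∈ deps, x ∈ graph.flatMap Prod.snd := fun x hx => hsub x (by simp [hx])
    by_cases hc : PySem.Set.contains v dep = true
    · have : pvExpand v q (dep :: deps) d1 = pvExpand v q deps d1 := by
        simp only [pvExpand, List.foldl_cons]
        rw [if_pos hc]
      rw [this]; exact ih hrest v q
    · have hstep : pvExpand v q (dep :: deps) d1 = pvExpand (v ++ [dep]) (q ++ [(dep, d1)]) deps d1 := by
        simp only [pvExpand, List.foldl_cons]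
        rw [if_neg hc]
        have : PySem.Set.add v dep = v ++ [dep] := by
          simp [PySem.Set.add]
          simpa [PySem.Set.contains] using hc
        rw [this]
      rw [hstep]
      have h1 := ih hrest (v ++ [dep]) (q ++ [(dep, d1)])
      have h2 : pvW graph (v ++ [dep]) < pvW graph v := by
        apply pvFilter_lt _ _ dep
        · intro x hx
          simp at hx ⊢
          tauto
        · simp
        · simpa [PySem.Set.contains] using hc
        · exact hdep
      simp at h1
      omega

theorem pvExpand_len (v : PySem.Set String) (d1 : Int) :
    ∀ (deps : List String) (q : List (String × Int)),
      q.length ≤ (pvExpand v q deps d1).2.length := by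
  intro deps
  induction deps generalizing v with
  | nil => intro q; simp [pvExpand]
  | cons dep deps ih =>
    intro q
    simp only [pvExpand, List.foldl_cons]
    by_cases hc : PySem.Set.contains v dep = true
    · rw [if_pos hc]; exact ih v q
    · rw [if_neg hc]
      have := ih (PySem.Set.add v dep) (q ++ [(dep, d1)])
      simp only [List.length_append, List.length_cons, List.length_nil] at this
      calc q.length ≤ (q ++ [(dep, d1)]).length := by simp
        _ ≤ _ := ih (PySem.Set.add v dep) (q ++ [(dep, d1)])

-- B's while loop: while i < len(queue): node, depth = queue[i]; i += 1; if depth < max_hops: … queue.append((dep, depth+1))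
def pvBLoop (graph : List (String × List String)) (max_hops : Int)
    (v : PySem.Set String) (q : List (String × Int)) (i : Nat) : List String :=
  if h : i < q.length then
    let node := (q[i]'h).1
    let depth := (q[i]'h).2
    if depth < max_hops then
      let st := pvExpand v q (pvAdj graph node) (depth + 1)
      pvBLoop graph max_hops st.1 st.2 (i + 1)
    else pvBLoop graph max_hops v q (i + 1)
  else v
termination_by (q.length - i) + 2 * pvW graph v
decreasing_by
  · have h1 := pvExpand_measure graph ((q[i]'h).2 + 1) (pvAdj graph (q[i]'h).1)
      (fun x hx => pvAdj_mem graph (q[i]'h).1 x hx) v q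
    have h2 := pvExpand_len v ((q[i]'h).2 + 1) (pvAdj graph (q[i]'h).1) q
    omega
  · omega

def bfs_expand_alt (seed_files : List String) (graph : List (String × List String)) (max_hops : Int) : List String :=
  pvBLoop graph max_hops (PySem.Set.ofList seed_files) (seed_files.map (fun f => (f, (0 : Int)))) 0

-- ===== PRECONDITION & SPEC =====
def Spec_bfs_expand (seed_files : List String) (graph : List (String × List String)) (max_hops : Int) (out : List String) : Prop := out = bfs_expand_alt seed_files graph max_hops
instance (seed_files : List String) (graph : List (String × List String)) (max_hops : Int) (out : List String) : Decidable (Spec_bfs_expand seed_files graph max_hops out) := by unfold Spec_bfs_expand; infer_instance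

-- ===== CLAIM (what is proved, stated in full; the proofs are below) =====
def Claim_equal_bfs_expand : Prop := ∀ (seed_files : List String) (graph : List (String × List String)) (max_hops : Int), Dom_bfs_expand seed_files graph max_hops → Spec_bfs_expand seed_files graph max_hops (bfs_expand seed_files graph max_hops)

-- ===== LEMMAS AND PROOFS =====

-- B's inner loop on queue `q ++ acc.map (·, d1)` IS A's inner loop on accumulator `acc`, tagged with d1
theorem pvExpand_eq_inner (d1 : Int) :
    ∀ (deps : List String) (v : PySem.Set String) (q : List (String × Int)) (acc : List String),
      pvExpand v (q ++ acc.map (fun f => (f, d1))) deps d1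
        = ((deps.foldl (fun st2 dep =>
              if PySem.Set.contains st2.1 dep then st2
              else (PySem.Set.add st2.1 dep, st2.2 ++ [dep])) (v, acc)).1,
           q ++ (deps.foldl (fun st2 dep =>
              if PySem.Set.contains st2.1 dep then st2
              else (PySem.Set.add st2.1 dep, st2.2 ++ [dep])) (v, acc)).2.map (fun f => (f, d1))) := by
  intro deps
  induction deps with
  | nil => intro v q acc; simp [pvExpand]
  | cons dep deps ih =>
    intro v q acc
    simp only [pvExpand, List.foldl_cons]
    by_cases hc : PySem.Set.contains v dep = true
    · rw [if_pos hc, if_pos hc]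
      exact ih v q acc
    · rw [if_neg hc, if_neg hc]
      have harr : (q ++ acc.map (fun f => (f, d1))) ++ [(dep, d1)]
          = q ++ (acc ++ [dep]).map (fun f => (f, d1)) := by
        simp
      show pvExpand _ _ deps d1 = _
      rw [harr]
      exact ih (PySem.Set.add v dep) q (acc ++ [dep])

theorem pvGetElem_mid (P t : List (String × Int)) (x : String × Int)
    (h : P.length < (P ++ x :: t).length) : (P ++ x :: t)[P.length]'h = x := by
  rw [List.getElem_append_right (Nat.le_refl _)]
  simp

-- a cursor that still has to pass only entries of depth ≥ max_hops drains the queue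
theorem pvBLoop_stop (graph : List (String × List String)) (M d : Int) (hM : M ≤ d) :
    ∀ (fr : List String) (P : List (String × Int)) (v : PySem.Set String),
      pvBLoop graph M v (P ++ fr.map (fun f => (f, d))) P.length = v := by
  intro fr
  induction fr with
  | nil => intro P v; rw [pvBLoop]; rw [dif_neg (by simp)]
  | cons f fr ih =>
    intro P v
    rw [List.map_cons, pvBLoop]
    have hlt : P.length < (P ++ (f, d) :: fr.map (fun f => (f, d))).length := by simp
    rw [dif_pos hlt]
    simp only [pvGetElem_mid]
    rw [if_neg (by omega)]
    have := ih (P ++ [(f, d)]) v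
    simpa using this

-- one level of B's queue processing is one round of A
theorem pvBLoop_level (graph : List (String × List String)) (M d : Int) (hd : d < M) :
    ∀ (fr : List String) (P : List (String × Int)) (v : PySem.Set String) (acc : List String),
      pvBLoop graph M v (P ++ fr.map (fun f => (f, d)) ++ acc.map (fun f => (f, d + 1))) P.length
        = pvBLoop graph M (fr.foldl (pvAStep graph) (v, acc)).1
            ((P ++ fr.map (fun f => (f, d)))
              ++ (fr.foldl (pvAStep graph) (v, acc)).2.map (fun f => (f, d + 1)))
            (P ++ fr.map (fun f => (f, d))).length := by
  intro fr
  induction fr with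
  | nil => intro P v acc; simp
  | cons f fr ih =>
    intro P v acc
    rw [List.map_cons]
    have hq : P ++ ((f, d) :: fr.map (fun f => (f, d))) ++ acc.map (fun f => (f, d + 1))
        = P ++ (f, d) :: (fr.map (fun f => (f, d)) ++ acc.map (fun f => (f, d + 1))) := by
      simp
    rw [hq, pvBLoop]
    have hlt : P.length <
        (P ++ (f, d) :: (fr.map (fun f => (f, d)) ++ acc.map (fun f => (f, d + 1)))).length := by
      simp
    rw [dif_pos hlt]
    simp only [pvGetElem_mid]
    rw [if_pos hd]
    have hback : P ++ (f, d) :: (fr.map (fun f => (f, d)) ++ acc.map (fun f => (f, d + 1)))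
        = (P ++ (f, d) :: fr.map (fun f => (f, d))) ++ acc.map (fun f => (f, d + 1)) := by
      simp
    rw [hback]
    have he := pvExpand_eq_inner (d + 1) (pvAdj graph f) v
      (P ++ (f, d) :: fr.map (fun f => (f, d))) acc
    simp only [he]
    have hA : (pvAdj graph f).foldl (fun st2 dep =>
        if PySem.Set.contains st2.1 dep then st2
        else (PySem.Set.add st2.1 dep, st2.2 ++ [dep])) (v, acc) = pvAStep graph (v, acc) f := rfl
    rw [hA, List.foldl_cons]
    have := ih (P ++ [(f, d)]) (pvAStep graph (v, acc) f).1 (pvAStep graph (v, acc) f).2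
    simpa using this

-- k remaining rounds: B's cursor at the first depth-d entry computes A's k-fold round iteration
theorem pvBLoop_rounds (graph : List (String × List String)) (M : Int) :
    ∀ (k : ℕ) (d : Int), d + k = M →
    ∀ (v : PySem.Set String) (fr : List String) (P : List (String × Int)),
      pvBLoop graph M v (P ++ fr.map (fun f => (f, d))) P.length
        = ((pvARound graph)^[k] (v, fr)).1 := by
  intro k
  induction k with
  | zero =>
    intro d hdk v fr P
    simp only [Function.iterate_zero, id]
    exact pvBLoop_stop graph M d (by omega) fr P v
  | succ k ih =>
    intro d hdk v fr P
    have hd : d < M := by omega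
    have h0 : P ++ fr.map (fun f => (f, d))
        = P ++ fr.map (fun f => (f, d)) ++ ([] : List String).map (fun f => (f, d + 1)) := by simp
    rw [h0, pvBLoop_level graph M d hd fr P v []]
    have hA : fr.foldl (pvAStep graph) (v, []) = pvARound graph (v, fr) := rfl
    rw [hA]
    rw [ih (d + 1) (by omega) (pvARound graph (v, fr)).1 (pvARound graph (v, fr)).2
      (P ++ fr.map (fun f => (f, d)))]
    rw [← Function.iterate_succ_apply]

-- A's `for _ in range(max_hops)` is iteration of pvARound
theorem pvFoldl_const_iterate (graph : List (String × List String)) :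
    ∀ (l : List Int) (st : List String × List String),
      l.foldl (fun st _ => pvARound graph st) st = (pvARound graph)^[l.length] st := by
  intro l
  induction l with
  | nil => intro st; simp
  | cons a l ih =>
    intro st
    rw [List.foldl_cons, List.length_cons, ih, ← Function.iterate_succ_apply]

-- ===== VERDICT (by name: the statement is the Claim_ definition above) =====
theorem bfs_expand_spec : Claim_equal_bfs_expand := by
  intro seed_files graph max_hops _
  unfold Spec_bfs_expand
  unfold bfs_expand bfs_expand_alt
  rw [pvFoldl_const_iterate, PySem.List.length_pyRange_one]
  by_cases hM : 0 ≤ max_hops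
  · have := pvBLoop_rounds graph max_hops ((max_hops - 0).toNat) 0
      (by rw [Int.toNat_of_nonneg (by omega)]; omega)
      (PySem.Set.ofList seed_files) seed_files []
    simpa using this.symm
  · have h0 : (max_hops - 0).toNat = 0 := by omega
    rw [h0]
    simp only [Function.iterate_zero, id]
    have := pvBLoop_stop graph max_hops 0 (by omega) seed_files []
      (PySem.Set.ofList seed_files)
    simpa using this.symm
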